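-- pv_equiv track=rewrite | github.com/barandenizkorkmaz/bogazici-university-undergraduate-projects | CMPE462/Mini-Project/Regression-Tree/Code/data_handler.py | feature_unique_values
-- ===== SOURCE A (Python) =====
-- def feature_unique_values(X):
--     dict = {}
--     for (i,row) in enumerate(X):
--         cur = []
--         for elem in row:
--             if elem not in cur:
--                 cur.append(elem)
--         cur.sort()
--         dict[i] = cur
--     return dict
-- ===== SOURCE B (Python) =====
-- def feature_unique_values(X):
--     result = {}
--     for i, row in enumerate(X):
--         uniq = []
--         for v in sorted(row):
--             if not uniq or uniq[-1] != v:
--                 uniq.append(v)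
--         result[i] = uniq
--     return result
-- ===== Notes on version B (the rewrite author's own statement) =====
-- stated objective: faster
-- what changed: Per row, A dedups order-preservingly with a membership test on the growing list and then sorts; B sorts the row first and removes adjacent duplicates in one linear pass comparing each value with the last kept one, eliminating the per-element membership scan.
import Mathlib
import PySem

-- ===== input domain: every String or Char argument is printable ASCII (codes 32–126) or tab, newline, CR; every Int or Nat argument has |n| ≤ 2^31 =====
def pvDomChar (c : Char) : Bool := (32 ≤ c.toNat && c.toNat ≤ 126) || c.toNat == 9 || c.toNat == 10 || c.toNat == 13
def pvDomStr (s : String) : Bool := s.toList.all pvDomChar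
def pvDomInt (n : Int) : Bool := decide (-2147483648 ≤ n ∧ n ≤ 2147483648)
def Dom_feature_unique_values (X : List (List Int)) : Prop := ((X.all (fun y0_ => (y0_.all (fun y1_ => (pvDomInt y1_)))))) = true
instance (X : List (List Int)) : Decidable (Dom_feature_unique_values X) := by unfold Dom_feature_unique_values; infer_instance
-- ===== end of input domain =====

-- B sorts each row first and removes adjacent duplicates in one left-to-right pass,
-- instead of A's order-preserving membership dedup followed by a sort (objective: alternative).


-- ===== PORT A =====
def feature_unique_values (X : List (List Int)) : List (Int × List Int) :=
  ((PySem.List.enumerate X 0).foldl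
    (fun (d : PySem.Dict Int (List Int)) p =>
      let cur := p.2.foldl (fun cur elem => if elem ∈ cur then cur else cur ++ [elem]) []
      d.insert p.1 (PySem.List.sorted cur (fun x => x) false))
    PySem.Dict.empty).items

-- ===== PORT B =====
def feature_unique_values_alt (X : List (List Int)) : List (Int × List Int) :=
  ((PySem.List.enumerate X 0).foldl
    (fun (d : PySem.Dict Int (List Int)) p =>
      let uniq := (PySem.List.sorted p.2 (fun x => x) false).foldl
        (fun (uniq : List Int) v =>
          if uniq = [] ∨ PySem.List.pyGet? uniq (-1) ≠ some v then uniq ++ [v] else uniq) []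
      d.insert p.1 uniq)
    PySem.Dict.empty).items

-- ===== PRECONDITION & SPEC =====
def Spec_feature_unique_values (X : List (List Int)) (out : List (Int × List Int)) : Prop := out = feature_unique_values_alt X
instance (X : List (List Int)) (out : List (Int × List Int)) : Decidable (Spec_feature_unique_values X out) := by unfold Spec_feature_unique_values; infer_instance

-- ===== CLAIM (what is proved, stated in full; the proofs are below) =====
def Claim_equal_feature_unique_values : Prop := ∀ (X : List (List Int)), Dom_feature_unique_values X → Spec_feature_unique_values X (feature_unique_values X)

-- ===== LEMMAS AND PROOFS =====

-- B's inner loop body, named for the proofs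
def fuvStep (uniq : List Int) (v : Int) : List Int :=
  if uniq = [] ∨ PySem.List.pyGet? uniq (-1) ≠ some v then uniq ++ [v] else uniq

theorem mem_foldB (a : Int) (s : List Int) :
    ∀ (acc : List Int), a ∈ s.foldl fuvStep acc ↔ a ∈ acc ∨ a ∈ s := by
  induction s with
  | nil => intro acc; simp
  | cons v t ih =>
    intro acc
    simp only [List.foldl_cons, fuvStep]
    split_ifs with h
    · rw [ih (acc ++ [v])]; simp [or_assoc]
    · rw [not_or, not_not] at h
      obtain ⟨hne, hlast⟩ := h
      have hv : v ∈ acc := by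
        rw [PySem.List.pyGet?_neg_one] at hlast
        exact List.mem_of_getLast? hlast
      rw [ih acc]
      constructor
      · rintro (ha | ha)
        · exact Or.inl ha
        · exact Or.inr (by simp [ha])
      · rintro (ha | ha)
        · exact Or.inl ha
        · rcases List.mem_cons.mp ha with rfl | ha
          · exact Or.inl hv
          · exact Or.inr ha

theorem pairwise_foldB (s : List Int) :
    ∀ (acc : List Int), acc.Pairwise (· < ·) → s.Pairwise (· ≤ ·) →
      (∀ a ∈ acc, ∀ b ∈ s, a ≤ b) →
      (∀ l, acc.getLast? = some l → ∀ a ∈ acc, a ≤ l) →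
      (s.foldl fuvStep acc).Pairwise (· < ·) := by
  induction s with
  | nil => intro acc hacc _ _ _; simpa using hacc
  | cons v t ih =>
    intro acc hacc hs hle hlast
    have hvt : ∀ b ∈ t, v ≤ b := (List.pairwise_cons.mp hs).1
    have ht : t.Pairwise (· ≤ ·) := hs.tail
    simp only [List.foldl_cons, fuvStep]
    split_ifs with h
    · -- append v
      refine ih (acc ++ [v]) ?_ ht ?_ ?_
      · rw [List.pairwise_append]
        refine ⟨hacc, by simp, ?_⟩
        intro a ha b hb
        have hbv := List.mem_singleton.mp hb
        rcases h with h0 | hne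
        · exact absurd ha (by simp [h0])
        · rcases hl : acc.getLast? with _ | l
          · exact absurd ha (by simp [List.getLast?_eq_none_iff.mp hl])
          · have hal : a ≤ l := hlast l hl a ha
            have hlmem : l ∈ acc := List.mem_of_getLast? hl
            have hlv : l ≤ b := hle l hlmem b (by simp [hbv])
            have hlv' : l ≠ b := fun he => hne (by rw [PySem.List.pyGet?_neg_one, hl, he, hbv])
            exact lt_of_le_of_lt hal (lt_of_le_of_ne hlv hlv')
      · intro a ha b hb
        rcases List.mem_append.mp ha with ha | ha
        · exact hle a ha b (List.mem_cons_of_mem v hb)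
        · rcases List.mem_singleton.mp ha with rfl
          exact hvt b hb
      · intro l hl a ha
        have hlv : v = l := by simpa using hl
        subst hlv
        rcases List.mem_append.mp ha with ha | ha
        · exact hle a ha v (by simp)
        · simp at ha; omega
    · -- skip v
      refine ih acc hacc ht ?_ hlast
      intro a ha b hb
      exact hle a ha b (List.mem_cons_of_mem v hb)

theorem nodup_dedupA (row : List Int) :
    ∀ (acc : List Int), acc.Nodup →
      (row.foldl (fun cur elem => if elem ∈ cur then cur else cur ++ [elem]) acc).Nodup := by
  induction row with
  | nil => intro acc h; simpa using h
  | cons e t ih =>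
    intro acc hacc
    simp only [List.foldl_cons]
    split_ifs with h
    · exact ih acc hacc
    · refine ih (acc ++ [e]) ?_
      simp [List.nodup_append, hacc]
      exact fun a ha he => h (he ▸ ha)

theorem mem_dedupA (a : Int) (row : List Int) :
    ∀ (acc : List Int),
      a ∈ row.foldl (fun cur elem => if elem ∈ cur then cur else cur ++ [elem]) acc ↔
        a ∈ acc ∨ a ∈ row := by
  induction row with
  | nil => intro acc; simp
  | cons e t ih =>
    intro acc
    simp only [List.foldl_cons]
    split_ifs with h
    · rw [ih acc]
      constructor
      · rintro (ha | ha) <;> simp [ha]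
      · rintro (ha | ha)
        · exact Or.inl ha
        · rcases List.mem_cons.mp ha with rfl | ha
          · exact Or.inl h
          · exact Or.inr ha
    · rw [ih (acc ++ [e])]
      simp [or_assoc]

theorem row_eq (row : List Int) :
    PySem.List.sorted
        (row.foldl (fun cur elem => if elem ∈ cur then cur else cur ++ [elem]) [])
        (fun x => x) false
      = (PySem.List.sorted row (fun x => x) false).foldl fuvStep [] := by
  set s := PySem.List.sorted row (fun x => x) false with hs
  have hsp : s.Pairwise (· ≤ ·) := by
    simpa using PySem.List.sorted_pairwise row (fun x => x)
  have hys : (s.foldl fuvStep []).Pairwise (· < ·) :=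
    pairwise_foldB s [] (by simp) hsp (by simp) (by simp)
  have hysnd : (s.foldl fuvStep []).Nodup := hys.imp (fun h => ne_of_lt h)
  have hdednd := nodup_dedupA row [] List.nodup_nil
  have hmem : ∀ a, a ∈ s.foldl fuvStep [] ↔
      a ∈ row.foldl (fun cur elem => if elem ∈ cur then cur else cur ++ [elem]) [] := by
    intro a
    rw [mem_foldB a s, mem_dedupA a row []]
    have : a ∈ s ↔ a ∈ row := by
      rw [hs]; exact PySem.List.mem_sorted row (fun x => x) false a
    simp [this]
  have hperm : (s.foldl fuvStep []).Perm
      (row.foldl (fun cur elem => if elem ∈ cur then cur else cur ++ [elem]) []) :=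
    (List.perm_ext_iff_of_nodup hysnd hdednd).mpr hmem
  exact PySem.List.sorted_eq_of_perm_of_pairwise_lt _ _ _ hperm hys

-- ===== VERDICT (by name: the statement is the Claim_ definition above) =====
theorem feature_unique_values_spec : Claim_equal_feature_unique_values := by
  intro X _
  unfold Spec_feature_unique_values feature_unique_values feature_unique_values_alt
  congr 2
  funext d p
  show d.insert p.1 (PySem.List.sorted
      (p.2.foldl (fun cur elem => if elem ∈ cur then cur else cur ++ [elem]) [])
      (fun x => x) false)
    = d.insert p.1 ((PySem.List.sorted p.2 (fun x => x) false).foldl fuvStep [])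
  rw [row_eq p.2]
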